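-- pv_equiv track=rewrite | github.com/Alpha-rgb-cell/IP_Assignment_IIITD | IP_Assignment2_Q3.py | find_max_min_signatures
-- ===== SOURCE A (Python) =====
-- def find_max_min_signatures(yearbook):
--     max_signatures = []
--     min_signatures = []
--     max_count = 0
--     min_count = float('inf')
--     for student in yearbook:
--         signature_count = sum(yearbook[student].values())
--         if signature_count > max_count:
--             max_count = signature_count
--             max_signatures = [student]
--         elif signature_count == max_count:
--             max_signatures.append(student)
--         if signature_count < min_count:
--             min_count = signature_count
--             min_signatures = [student]
--         elif signature_count == min_count:
--             min_signatures.append(student)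
--     return max_signatures, min_signatures
-- ===== SOURCE B (Python) =====
-- def find_max_min_signatures(yearbook):
--     counts = {s: sum(sigs.values()) for s, sigs in yearbook.items()}
--     if not counts:
--         return [], []
--     max_count = max(counts.values())
--     min_count = min(counts.values())
--     return ([s for s, c in counts.items() if c == max_count],
--             [s for s, c in counts.items() if c == min_count])
-- ===== Notes on version B (the rewrite author's own statement) =====
-- stated objective: simpler
-- what changed: Replaces A's single pass maintaining four pieces of running max/min state with a two-phase decomposition: build a totals dict once, take max/min of its values, then select matching students by comprehension.
-- intended difference: On non-empty yearbooks where every student's total signature count is negative, A returns an empty max-signatures list (its running max is floored at its initial 0), while B returns the students attaining the true maximum, which is the intended answer. — e.g. on find_max_min_signatures([("a", [("x", -1)])]): A returns ([], ["a"]), B returns (["a"], ["a"])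
import Mathlib
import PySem

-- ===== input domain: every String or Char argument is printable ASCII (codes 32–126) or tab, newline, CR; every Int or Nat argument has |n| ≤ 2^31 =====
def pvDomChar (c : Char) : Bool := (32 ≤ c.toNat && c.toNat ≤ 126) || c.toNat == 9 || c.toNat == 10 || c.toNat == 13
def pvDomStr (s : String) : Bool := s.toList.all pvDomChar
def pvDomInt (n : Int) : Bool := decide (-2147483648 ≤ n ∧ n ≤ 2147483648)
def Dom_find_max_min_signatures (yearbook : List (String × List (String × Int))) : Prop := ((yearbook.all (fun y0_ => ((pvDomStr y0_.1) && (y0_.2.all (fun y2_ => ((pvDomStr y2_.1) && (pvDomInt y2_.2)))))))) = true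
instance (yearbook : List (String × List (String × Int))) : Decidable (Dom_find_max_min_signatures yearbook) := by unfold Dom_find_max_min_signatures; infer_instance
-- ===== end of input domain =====

-- B rebuilds the result in two phases (a totals dict, then max/min selection) instead of A's
-- four-variable running-state loop; on non-empty all-negative-total yearbooks A's max list is
-- accidentally empty (running max floored at 0) and B returns the true argmax students (see D_).


-- ===== PORT A =====
-- sum(d.values()) for an inner signature dict
def pvSigSum (sigs : List (String × Int)) : Int :=
  (PySem.Dict.values (PySem.Dict.mk sigs)).sum

-- literal port of A: one fold carrying (max_signatures, min_signatures, max_count, min_count);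
-- Python's float('inf') initial min_count is the `none` of an Option Int
def find_max_min_signatures (yearbook : List (String × List (String × Int))) : List String × List String :=
  let r := yearbook.foldl
    (fun (acc : List String × List String × Int × Option Int) p =>
      let signature_count := pvSigSum ((PySem.Dict.mk yearbook).getD p.1 [])
      let m := if signature_count > acc.2.2.1 then ([p.1], signature_count)
               else if signature_count = acc.2.2.1 then (acc.1 ++ [p.1], acc.2.2.1)
               else (acc.1, acc.2.2.1)
      let n := match acc.2.2.2 with
               | none => ([p.1], some signature_count)
               | some v =>
                 if signature_count < v then ([p.1], some signature_count)
                 else if signature_count = v then (acc.2.1 ++ [p.1], some v)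
                 else (acc.2.1, some v)
      (m.1, n.1, m.2, n.2))
    ([], [], 0, none)
  (r.1, r.2.1)

-- ===== PORT B =====
def find_max_min_signatures_alt (yearbook : List (String × List (String × Int))) : List String × List String :=
  let counts : PySem.Dict String Int :=
    yearbook.foldl (fun d p => d.insert p.1 (pvSigSum p.2)) PySem.Dict.empty
  match PySem.List.max? (PySem.Dict.values counts) (fun v => v),
        PySem.List.min? (PySem.Dict.values counts) (fun v => v) with
  | some mx, some mn =>
      ((counts.items.filter (fun q => q.2 == mx)).map Prod.fst,
       (counts.items.filter (fun q => q.2 == mn)).map Prod.fst)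
  | _, _ => ([], [])

-- ===== PRECONDITION & SPEC =====
-- Pre_ excludes yearbooks with duplicate student names: a Python dict cannot contain them,
-- so the association-list representation is only meaningful with distinct keys.
def Pre_find_max_min_signatures (yearbook : List (String × List (String × Int))) : Prop :=
  (yearbook.map Prod.fst).Nodup
instance (yearbook : List (String × List (String × Int))) : Decidable (Pre_find_max_min_signatures yearbook) := by unfold Pre_find_max_min_signatures; infer_instance
def pvWitness_find_max_min_signatures : (List (String × List (String × Int))) :=
  [("alice", [("bob", 2), ("carol", 1)]), ("bob", [("alice", 0)])]

-- On non-empty yearbooks where every student's total signature count is negative, A returns an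
-- empty max-signatures list (its running max is floored at its initial 0), while B returns the
-- students attaining the true maximum, which is the intended answer.
def D_find_max_min_signatures (yearbook : List (String × List (String × Int))) : Prop :=
  yearbook ≠ [] ∧ ∀ p ∈ yearbook, (p.2.map Prod.snd).sum < 0
instance (yearbook : List (String × List (String × Int))) : Decidable (D_find_max_min_signatures yearbook) := by unfold D_find_max_min_signatures; infer_instance

def Spec_find_max_min_signatures (yearbook : List (String × List (String × Int))) (out : List String × List String) : Prop := ¬ D_find_max_min_signatures yearbook → out = find_max_min_signatures_alt yearbook
instance (yearbook : List (String × List (String × Int))) (out : List String × List String) : Decidable (Spec_find_max_min_signatures yearbook out) := by unfold Spec_find_max_min_signatures; infer_instance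

def pvDiffWitness_find_max_min_signatures : (List (String × List (String × Int))) :=
  [("a", [("x", -1)])]
def pvDiffWitnessOut_find_max_min_signatures : (List String × List String) × (List String × List String) :=
  (([], ["a"]), (["a"], ["a"]))

-- ===== CLAIM =====
def Claim_unchanged_find_max_min_signatures : Prop := ∀ (yearbook : List (String × List (String × Int))), Dom_find_max_min_signatures yearbook → Pre_find_max_min_signatures yearbook → Spec_find_max_min_signatures yearbook (find_max_min_signatures yearbook)
def Claim_changed_find_max_min_signatures : Prop := Dom_find_max_min_signatures (pvDiffWitness_find_max_min_signatures) ∧ Pre_find_max_min_signatures (pvDiffWitness_find_max_min_signatures) ∧ D_find_max_min_signatures (pvDiffWitness_find_max_min_signatures) ∧ find_max_min_signatures (pvDiffWitness_find_max_min_signatures) = pvDiffWitnessOut_find_max_min_signatures.1 ∧ find_max_min_signatures_alt (pvDiffWitness_find_max_min_signatures) = pvDiffWitnessOut_find_max_min_signatures.2 ∧ pvDiffWitnessOut_find_max_min_signatures.1 ≠ pvDiffWitnessOut_find_max_min_signatures.2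
def Claim_exact_find_max_min_signatures : Prop := ∀ (yearbook : List (String × List (String × Int))), Dom_find_max_min_signatures yearbook → Pre_find_max_min_signatures yearbook → D_find_max_min_signatures yearbook → find_max_min_signatures yearbook ≠ find_max_min_signatures_alt yearbook

-- ===== LEMMAS AND PROOFS =====

def pvTot (p : String × List (String × Int)) : Int := (p.2.map Prod.snd).sum

def pvStep (acc : List String × List String × Int × Option Int) (q : String × Int) :
    List String × List String × Int × Option Int :=
  let m := if q.2 > acc.2.2.1 then ([q.1], q.2)
           else if q.2 = acc.2.2.1 then (acc.1 ++ [q.1], acc.2.2.1)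
           else (acc.1, acc.2.2.1)
  let n := match acc.2.2.2 with
           | none => ([q.1], some q.2)
           | some v =>
             if q.2 < v then ([q.1], some q.2)
             else if q.2 = v then (acc.2.1 ++ [q.1], some v)
             else (acc.2.1, some v)
  (m.1, n.1, m.2, n.2)

def pvMaxC (pre : List (String × Int)) : Int := (pre.map Prod.snd).foldl max 0
def pvMinC : List (String × Int) → Option Int
  | [] => none
  | q :: t => some ((t.map Prod.snd).foldl min q.2)

def pvState (pre : List (String × Int)) : List String × List String × Int × Option Int :=
  ((pre.filter (fun q => q.2 == pvMaxC pre)).map Prod.fst,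
   (pre.filter (fun q => some q.2 == pvMinC pre)).map Prod.fst,
   pvMaxC pre, pvMinC pre)

lemma pvMaxC_append (pre : List (String × Int)) (q : String × Int) :
    pvMaxC (pre ++ [q]) = max (pvMaxC pre) q.2 := by
  simp [pvMaxC]

lemma pvMaxC_nonneg (pre : List (String × Int)) : 0 ≤ pvMaxC pre :=
  (PySem.List.le_foldl_max (pre.map Prod.snd) 0).1

lemma le_pvMaxC (pre : List (String × Int)) {q : String × Int} (h : q ∈ pre) :
    q.2 ≤ pvMaxC pre :=
  (PySem.List.le_foldl_max (pre.map Prod.snd) 0).2 q.2 (List.mem_map_of_mem h)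

lemma foldl_min_le (t : List Int) (a : Int) :
    t.foldl min a ≤ a ∧ ∀ y ∈ t, t.foldl min a ≤ y := by
  induction t generalizing a with
  | nil => simp
  | cons x t ih =>
    refine ⟨le_trans (ih (min a x)).1 (min_le_left _ _), ?_⟩
    intro y hy
    rcases List.mem_cons.mp hy with rfl | hy
    · exact le_trans (ih (min a y)).1 (min_le_right _ _)
    · exact (ih (min a x)).2 y hy

lemma pvMinC_append (pre : List (String × Int)) (q : String × Int) :
    pvMinC (pre ++ [q]) = some (match pvMinC pre with
                                | none => q.2
                                | some v => min v q.2) := by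
  cases pre with
  | nil => simp [pvMinC]
  | cons r t => simp [pvMinC]

lemma pvMinC_le (pre : List (String × Int)) {v : Int} (h : pvMinC pre = some v)
    {q : String × Int} (hq : q ∈ pre) : v ≤ q.2 := by
  cases pre with
  | nil => simp at hq
  | cons r t =>
    simp only [pvMinC, Option.some.injEq] at h
    subst h
    rcases List.mem_cons.mp hq with rfl | hq
    · exact (foldl_min_le _ _).1
    · exact (foldl_min_le _ _).2 q.2 (List.mem_map_of_mem hq)

lemma pvMinC_eq_none (pre : List (String × Int)) : pvMinC pre = none ↔ pre = [] := by
  cases pre <;> simp [pvMinC]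



lemma pvStep_state (pre : List (String × Int)) (q : String × Int) :
    pvStep (pvState pre) q = pvState (pre ++ [q]) := by
  have hmax := pvMaxC_append pre q
  have hmin := pvMinC_append pre q
  unfold pvStep pvState
  rw [hmax, hmin]
  simp only [List.filter_append, List.map_append, Prod.mk.injEq]
  refine ⟨?_, ?_, ?_, ?_⟩
  · -- max signatures
    split_ifs with h1 h2
    · rw [max_eq_right h1.le]
      have hfil : pre.filter (fun r => r.2 == q.2) = [] := by
        rw [List.filter_eq_nil_iff]
        intro r hr
        have := le_pvMaxC pre hr
        simp only [beq_iff_eq]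
        omega
      simp [hfil]
    · rw [h2, max_self]
      simp [h2]
    · rw [max_eq_left (by omega)]
      have hq : (q.2 == pvMaxC pre) = false := beq_eq_false_iff_ne.mpr h2
      simp [hq]
  · -- min signatures
    cases hP : pvMinC pre with
    | none =>
      have : pre = [] := (pvMinC_eq_none pre).mp hP
      subst this
      simp
    | some v =>
      simp only []
      split_ifs with h3 h4
      · rw [min_eq_right h3.le]
        have hfil : pre.filter (fun r => some r.2 == some q.2) = [] := by
          rw [List.filter_eq_nil_iff]
          intro r hr
          have := pvMinC_le pre hP hr
          simp only [beq_iff_eq, Option.some.injEq]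
          omega
        rw [hfil]
        simp
      · rw [h4, min_self]
        simp [h4]
      · rw [min_eq_left (by omega)]
        simp
        exact h4
  · -- max count
    split_ifs with h1 h2 <;> simp [max_def] <;> omega
  · -- min count
    cases hP : pvMinC pre with
    | none => simp
    | some v =>
      simp only [min_def]
      split_ifs with h3 h4 <;> simp only [Option.some.injEq] <;> omega

lemma pvLoop (cs pre : List (String × Int)) :
    cs.foldl pvStep (pvState pre) = pvState (pre ++ cs) := by
  induction cs generalizing pre with
  | nil => simp
  | cons q cs ih =>
    rw [List.foldl_cons, pvStep_state, ih]
    simp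

def pvTotPair (p : String × List (String × Int)) : String × Int := (p.1, pvTot p)

def pvCs (yearbook : List (String × List (String × Int))) : List (String × Int) :=
  yearbook.map pvTotPair

lemma pvSigSum_eq (sigs : List (String × Int)) : pvSigSum sigs = (sigs.map Prod.snd).sum := by
  simp [pvSigSum, PySem.Dict.values_mk]

lemma A_char (yb : List (String × List (String × Int))) (h : (yb.map Prod.fst).Nodup) :
    find_max_min_signatures yb = ((pvState (pvCs yb)).1, (pvState (pvCs yb)).2.1) := by
  unfold find_max_min_signatures
  have hcong := PySem.List.foldl_congr_mem yb
    (fun (acc : List String × List String × Int × Option Int) p =>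
      let signature_count := pvSigSum ((PySem.Dict.mk yb).getD p.1 [])
      let m := if signature_count > acc.2.2.1 then ([p.1], signature_count)
               else if signature_count = acc.2.2.1 then (acc.1 ++ [p.1], acc.2.2.1)
               else (acc.1, acc.2.2.1)
      let n := match acc.2.2.2 with
               | none => ([p.1], some signature_count)
               | some v =>
                 if signature_count < v then ([p.1], some signature_count)
                 else if signature_count = v then (acc.2.1 ++ [p.1], some v)
                 else (acc.2.1, some v)
      (m.1, n.1, m.2, n.2))
    (fun acc p => pvStep acc (pvTotPair p)) ([], [], 0, none) ?_
  · rw [hcong, ← List.foldl_map (f := pvTotPair) (g := pvStep)]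
    have h0 : pvState [] = ([], [], 0, none) := rfl
    rw [← h0, pvLoop, List.nil_append]
    rfl
  · intro acc p hp
    have hg : (PySem.Dict.mk yb).getD p.1 [] = p.2 := by
      apply PySem.Dict.getD_of_mem_items (PySem.Dict.mk yb) (k := p.1) (v := p.2)
      · simpa using hp
      · simpa [PySem.Dict.keys] using h
    simp only [hg, pvStep, pvTotPair, pvTot, pvSigSum_eq]

lemma B_char (yb : List (String × List (String × Int))) (h : (yb.map Prod.fst).Nodup) :
    find_max_min_signatures_alt yb =
      match PySem.List.max? ((pvCs yb).map Prod.snd) (fun v => v),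
            PySem.List.min? ((pvCs yb).map Prod.snd) (fun v => v) with
      | some mx, some mn =>
          (((pvCs yb).filter (fun q => q.2 == mx)).map Prod.fst,
           ((pvCs yb).filter (fun q => q.2 == mn)).map Prod.fst)
      | _, _ => ([], []) := by
  unfold find_max_min_signatures_alt
  have hitems : (yb.foldl (fun d p => d.insert p.1 (pvSigSum p.2)) PySem.Dict.empty).items
      = pvCs yb := by
    rw [PySem.Dict.items_foldl_insert_fresh yb Prod.fst (fun p => pvSigSum p.2) PySem.Dict.empty
      (fun a _ => PySem.Dict.contains_empty _) h]
    rfl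
  have hd : (yb.foldl (fun d p => d.insert p.1 (pvSigSum p.2)) PySem.Dict.empty)
      = PySem.Dict.mk (pvCs yb) := PySem.Dict.ext hitems
  rw [hd]
  simp only [PySem.Dict.values_mk]

lemma pvEquiv (yb : List (String × List (String × Int))) (h : (yb.map Prod.fst).Nodup)
    (hnd : ¬(yb ≠ [] ∧ ∀ p ∈ yb, (p.2.map Prod.snd).sum < 0)) :
    find_max_min_signatures yb = find_max_min_signatures_alt yb := by
  rw [A_char yb h, B_char yb h]
  cases yb with
  | nil => rfl
  | cons p t =>
    have hcs : pvCs (p :: t) = pvTotPair p :: pvCs t := rfl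
    have hmap : (pvCs (p :: t)).map Prod.snd = (pvTotPair p).2 :: (pvCs t).map Prod.snd := rfl
    rw [hmap, PySem.List.max?_id_cons, PySem.List.min?_id_cons]
    -- the true maximum is nonnegative
    have hex : ∃ r ∈ p :: t, 0 ≤ (r.2.map Prod.snd).sum := by
      simp only [ne_eq, not_and, not_forall, not_lt] at hnd
      obtain ⟨r, hr, hge⟩ := hnd (by simp)
      exact ⟨r, hr, hge⟩
    have hge : 0 ≤ ((pvCs t).map Prod.snd).foldl max (pvTotPair p).2 := by
      obtain ⟨r, hr, hge⟩ := hex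
      have hmem : (pvTotPair r).2 ∈ (pvCs (p :: t)).map Prod.snd :=
        List.mem_map_of_mem (List.mem_map_of_mem hr)
      rw [hmap] at hmem
      have hle : (pvTotPair r).2 ≤ ((pvCs t).map Prod.snd).foldl max (pvTotPair p).2 := by
        rcases List.mem_cons.mp hmem with he | hm
        · rw [he]; exact (PySem.List.le_foldl_max _ _).1
        · exact (PySem.List.le_foldl_max _ _).2 _ hm
      have : 0 ≤ (pvTotPair r).2 := hge
      omega
    have hM : pvMaxC (pvCs (p :: t)) = ((pvCs t).map Prod.snd).foldl max (pvTotPair p).2 := by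
      show ((pvCs (p :: t)).map Prod.snd).foldl max 0 = _
      rw [hmap, List.foldl_cons, List.foldl_assoc]
      exact max_eq_right hge
    have hm : pvMinC (pvCs (p :: t)) = some (((pvCs t).map Prod.snd).foldl min (pvTotPair p).2) := rfl
    simp only [pvState, hM, hm]
    have hpred : (fun r : String × Int =>
        some r.2 == some (((pvCs t).map Prod.snd).foldl min (pvTotPair p).2)) =
        (fun r : String × Int => r.2 == ((pvCs t).map Prod.snd).foldl min (pvTotPair p).2) := by
      funext r; simp
    rw [hpred]

lemma pvTight (yb : List (String × List (String × Int))) (h : (yb.map Prod.fst).Nodup)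
    (hne : yb ≠ []) (hneg : ∀ p ∈ yb, (p.2.map Prod.snd).sum < 0) :
    find_max_min_signatures yb ≠ find_max_min_signatures_alt yb := by
  rw [A_char yb h, B_char yb h]
  cases yb with
  | nil => exact absurd rfl hne
  | cons p t =>
    have hmap : (pvCs (p :: t)).map Prod.snd = (pvTotPair p).2 :: (pvCs t).map Prod.snd := rfl
    rw [hmap, PySem.List.max?_id_cons, PySem.List.min?_id_cons]
    -- A's max list is empty
    have hA : (pvCs (p :: t)).filter (fun q => q.2 == pvMaxC (pvCs (p :: t))) = [] := by
      rw [List.filter_eq_nil_iff]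
      intro q hq
      obtain ⟨a, ha, rfl⟩ := List.mem_map.mp hq
      have h1 : (a.2.map Prod.snd).sum < 0 := hneg a ha
      have h2 : 0 ≤ pvMaxC (pvCs (p :: t)) := pvMaxC_nonneg _
      have h3 : (pvTotPair a).2 = (a.2.map Prod.snd).sum := rfl
      simp only [beq_iff_eq, h3]
      omega
    -- B's max list is nonempty
    set M := ((pvCs t).map Prod.snd).foldl max (pvTotPair p).2 with hMdef
    have hmem : M ∈ (pvCs (p :: t)).map Prod.snd := by
      have := PySem.List.max?_mem (xs := (pvTotPair p).2 :: (pvCs t).map Prod.snd)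
        (key := fun v => v) (m := M) (PySem.List.max?_id_cons _ _)
      rw [hmap]
      exact this
    obtain ⟨q, hq, hq2⟩ := List.mem_map.mp hmem
    have hB : q ∈ (pvCs (p :: t)).filter (fun r => r.2 == M) :=
      List.mem_filter.mpr ⟨hq, by simp [hq2]⟩
    intro heq
    have h1 := congrArg Prod.fst heq
    simp only [pvState, hA] at h1
    have : q.1 ∈ ([] : List String) := by
      simp only [List.map_nil] at h1
      rw [h1]
      exact List.mem_map_of_mem hB
    simp at this

-- ===== VERDICT =====
theorem find_max_min_signatures_spec : Claim_unchanged_find_max_min_signatures := by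
  intro yb _ hpre
  unfold Spec_find_max_min_signatures
  intro hnd
  unfold D_find_max_min_signatures at hnd
  exact pvEquiv yb hpre hnd

theorem find_max_min_signatures_changed : Claim_changed_find_max_min_signatures := by
  unfold Claim_changed_find_max_min_signatures; decide

theorem find_max_min_signatures_tight : Claim_exact_find_max_min_signatures := by
  intro yb _ hpre hd
  obtain ⟨hne, hneg⟩ := hd
  exact pvTight yb hpre hne hneg
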